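-- pv_equiv track=rewrite | github.com/guyrosin/learning-word-relatedness | peak_detection.py | pad_with_zeros
-- ===== SOURCE A (Python) =====
-- def pad_with_zeros(hist_list):
--     """ For each year which doesn't exist here, put 0 """
--     last_year = hist_list[0][0] - 1  # initialize to be less than the first year
--     i = 0
--     while i < len(hist_list):
--         year_item = hist_list[i]
--         if year_item[0] - last_year > 1:
--             # fill the gap
--             while year_item[0] - last_year > 1:
--                 last_year += 1
--                 hist_list.insert(i, (last_year, 0))
--                 i += 1
--         last_year += 1
--         i += 1
--     return hist_list
-- ===== SOURCE B (Python) =====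
-- def pad_with_zeros(hist_list):
--     """ For each year which doesn't exist here, put 0 (fresh list; input not mutated) """
--     out = []
--     last = hist_list[0][0] - 1
--     for item in hist_list:
--         if item[0] - last > 1:
--             out.extend((y, 0) for y in range(last + 1, item[0]))
--             last = item[0]
--         else:
--             last += 1
--         out.append(item)
--     return out
-- ===== Notes on version B (the rewrite author's own statement) =====
-- stated objective: alternative
-- what changed: A fills each gap by repeatedly mutating the list in place (insert at position i inside a nested while, with index arithmetic over the growing list); B makes one forward pass over the original items, emitting each gap as a whole range of zero entries into a fresh output list and never mutating the input.
import Mathlib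
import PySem

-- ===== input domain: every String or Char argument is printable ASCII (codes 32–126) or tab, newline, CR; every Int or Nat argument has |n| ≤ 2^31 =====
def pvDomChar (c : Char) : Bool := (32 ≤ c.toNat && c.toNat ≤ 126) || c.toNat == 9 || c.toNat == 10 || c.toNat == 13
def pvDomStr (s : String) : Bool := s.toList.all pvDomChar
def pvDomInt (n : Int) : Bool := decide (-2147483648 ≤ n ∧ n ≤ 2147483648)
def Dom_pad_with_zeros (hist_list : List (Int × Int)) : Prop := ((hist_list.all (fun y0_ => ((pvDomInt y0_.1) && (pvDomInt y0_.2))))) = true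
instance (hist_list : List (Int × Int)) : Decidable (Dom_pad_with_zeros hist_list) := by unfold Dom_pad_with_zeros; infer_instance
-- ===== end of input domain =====

-- B builds a fresh padded list in one forward pass instead of A's in-place shift-and-insert;
-- A mutates its argument in place and returns it, B does not mutate — the equivalence proved
-- here is about the RETURN value only.

-- ===== PORT A =====
-- inner 'while year_item[0] - last_year > 1' loop: inserts (last_year, 0) at position i.
-- fuel = (y - last).toNat, the exact number of remaining iterations (structural recursion guard).
def padFill : Nat → List (Int × Int) → Nat → Int → Int → List (Int × Int) × Nat × Int
  | 0, xs, i, last, _ => (xs, i, last)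
  | fuel + 1, xs, i, last, y =>
    if y - last > 1 then
      padFill fuel (PySem.List.insert xs (i : Int) (last + 1, 0)) (i + 1) (last + 1) y
    else (xs, i, last)

-- outer 'while i < len(hist_list)' loop.
-- fuel = xs.length - i, the exact number of remaining original items (structural recursion guard).
def padLoop : Nat → List (Int × Int) → Nat → Int → List (Int × Int)
  | 0, xs, _, _ => xs
  | fuel + 1, xs, i, last =>
    if h : i < xs.length then
      let year_item := xs[i]
      let r := if year_item.1 - last > 1 then
                 padFill ((year_item.1 - last).toNat) xs i last year_item.1
               else (xs, i, last)
      padLoop fuel r.1 (r.2.1 + 1) (r.2.2 + 1)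
    else xs

def pad_with_zeros (hist_list : List (Int × Int)) : List (Int × Int) :=
  let last_year := (PySem.List.pyGetD hist_list 0 (0, 0)).1 - 1  -- hist_list[0][0] - 1 (Pre_ guards the empty list)
  padLoop hist_list.length hist_list 0 last_year

-- ===== PORT B =====
def padStep (st : List (Int × Int) × Int) (item : Int × Int) : List (Int × Int) × Int :=
  if item.1 - st.2 > 1 then
    (st.1 ++ (PySem.List.pyRange (st.2 + 1) item.1 1).map (fun y => (y, 0)) ++ [item], item.1)
  else (st.1 ++ [item], st.2 + 1)

def pad_with_zeros_alt (hist_list : List (Int × Int)) : List (Int × Int) :=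
  let last := (PySem.List.pyGetD hist_list 0 (0, 0)).1 - 1  -- hist_list[0][0] - 1 (Pre_ guards the empty list)
  (hist_list.foldl padStep ([], last)).1

-- ===== PRECONDITION & SPEC =====
-- Pre_ excludes only the empty list, on which the Python A (and B) raise IndexError.
def Pre_pad_with_zeros (hist_list : List (Int × Int)) : Prop := hist_list ≠ []
instance (hist_list : List (Int × Int)) : Decidable (Pre_pad_with_zeros hist_list) := by
  unfold Pre_pad_with_zeros; infer_instance

def pvWitness_pad_with_zeros : (List (Int × Int)) := [(1, 5), (4, 2)]

def Spec_pad_with_zeros (hist_list : List (Int × Int)) (out : List (Int × Int)) : Prop := out = pad_with_zeros_alt hist_list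
instance (hist_list : List (Int × Int)) (out : List (Int × Int)) : Decidable (Spec_pad_with_zeros hist_list out) := by unfold Spec_pad_with_zeros; infer_instance

-- ===== CLAIM (what is proved, stated in full; the proofs are below) =====
def Claim_equal_pad_with_zeros : Prop := ∀ (hist_list : List (Int × Int)), Dom_pad_with_zeros hist_list → Pre_pad_with_zeros hist_list → Spec_pad_with_zeros hist_list (pad_with_zeros hist_list)

-- ===== LEMMAS AND PROOFS =====

-- recursive characterisation both ports are reduced to
def goPad : List (Int × Int) → Int → List (Int × Int)
  | [], _ => []
  | item :: rest, last =>
    if item.1 - last > 1 then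
      (PySem.List.pyRange (last + 1) item.1 1).map (fun y => (y, 0)) ++ item :: goPad rest item.1
    else item :: goPad rest (last + 1)

theorem padFill_spec (n : Nat) : ∀ (xs : List (Int × Int)) (i : Nat) (last y : Int),
    (y - last).toNat = n → i ≤ xs.length →
    padFill n xs i last y =
      (xs.take i ++ (PySem.List.pyRange (last + 1) y 1).map (fun t => (t, (0:Int))) ++ xs.drop i,
       i + (y - 1 - last).toNat, last + (y - 1 - last).toNat) := by
  induction n with
  | zero =>
      intro xs i last y hn hi
      rw [padFill, PySem.List.pyRange_one_eq_nil (by omega)]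
      have h0 : (y - 1 - last).toNat = 0 := by omega
      simp [h0]
  | succ n ih =>
      intro xs i last y hn hi
      rw [padFill]
      by_cases h : y - last > 1
      case neg =>
        rw [if_neg h, PySem.List.pyRange_one_eq_nil (by omega)]
        have h0 : (y - 1 - last).toNat = 0 := by omega
        simp [h0]
      rw [if_pos h, PySem.List.insert_natCast xs i _ hi]
      have hA : (xs.take i).length = i := by simp [Nat.min_eq_left hi]
      have hlen : (xs.take i ++ (last + 1, (0:Int)) :: xs.drop i).length = xs.length + 1 := by
        rw [List.length_append, List.length_cons, hA, List.length_drop]; omega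
      rw [ih _ (i + 1) (last + 1) y (by omega) (by omega)]
      have ht : (xs.take i ++ (last + 1, (0:Int)) :: xs.drop i).take (i + 1)
          = xs.take i ++ [(last + 1, (0:Int))] := by
        rw [List.take_append, List.take_of_length_le (by omega), hA]
        have : i + 1 - i = 1 := by omega
        rw [this]
        simp
      have hd : (xs.take i ++ (last + 1, (0:Int)) :: xs.drop i).drop (i + 1) = xs.drop i := by
        rw [List.drop_append, List.drop_eq_nil_of_le (by omega), hA]
        have : i + 1 - i = 1 := by omega
        rw [this]
        simp
      rw [ht, hd]
      rw [PySem.List.pyRange_one_cons (show last + 1 < y by omega)]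
      refine congrArg₂ Prod.mk ?_ (congrArg₂ Prod.mk (by omega) (by omega))
      simp

theorem padLoop_eq (n : Nat) : ∀ (xs : List (Int × Int)) (i : Nat) (last : Int),
    xs.length - i ≤ n → i ≤ xs.length →
    padLoop n xs i last = xs.take i ++ goPad (xs.drop i) last := by
  induction n with
  | zero =>
      intro xs i last hn hi
      have hieq : i = xs.length := by omega
      rw [padLoop]
      simp [hieq, goPad]
  | succ n ih =>
      intro xs i last hn hi
      rw [padLoop]
      by_cases hlt : i < xs.length
      · simp only [dif_pos hlt]
        have hdrop : xs.drop i = xs[i] :: xs.drop (i + 1) := List.drop_eq_getElem_cons hlt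
        have hA : (xs.take i).length = i := by simp [Nat.min_eq_left hi]
        by_cases hgap : xs[i].1 - last > 1
        · simp only [if_pos hgap]
          rw [padFill_spec ((xs[i].1 - last).toNat) xs i last xs[i].1 rfl (le_of_lt hlt)]
          set k := (xs[i].1 - 1 - last).toNat with hk
          set zs := (PySem.List.pyRange (last + 1) xs[i].1 1).map (fun t => (t, (0:Int))) with hzs
          have hzlen : zs.length = k := by
            rw [hzs]; simp [PySem.List.length_pyRange_one]; omega
          have hlen : (xs.take i ++ zs ++ xs.drop i).length = xs.length + k := by
            simp [hzlen]; omega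
          rw [ih (xs.take i ++ zs ++ xs.drop i) (i + k + 1) _ (by omega) (by omega)]
          have e1 : i + k + 1 - i = k + 1 := by omega
          have e2 : k + 1 - k = 1 := by omega
          have t1 : List.take (i + k + 1) (xs.take i) = xs.take i := List.take_of_length_le (by omega)
          have t2 : List.take (k + 1) zs = zs := List.take_of_length_le (by omega)
          have ht : (xs.take i ++ zs ++ xs.drop i).take (i + k + 1) = xs.take i ++ zs ++ [xs[i]] := by
            have t3 : List.take 1 (xs[i] :: List.drop (i + 1) xs) = [xs[i]] := rfl
            rw [List.append_assoc, List.take_append, hA, e1, t1, List.take_append, hzlen, e2, t2,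
              hdrop, t3]
            exact (List.append_assoc _ _ _).symm
          have hd : (xs.take i ++ zs ++ xs.drop i).drop (i + k + 1) = xs.drop (i + 1) := by
            rw [List.append_assoc, List.drop_append, hA, e1,
              List.drop_append, hzlen, e2, List.drop_eq_nil_of_le (by omega),
              List.drop_eq_nil_of_le (by omega), hdrop]
            simp
          rw [ht, hd]
          have hlast : last + k + 1 = xs[i].1 := by omega
          rw [hlast, hdrop]
          conv_rhs => rw [goPad]
          rw [if_pos hgap, ← hzs]
          simp only [List.append_assoc, List.cons_append, List.nil_append]
        · simp only [if_neg hgap]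
          rw [ih xs (i + 1) (last + 1) (by omega) (by omega)]
          rw [hdrop]
          have ht : xs.take (i + 1) = xs.take i ++ [xs[i]] := List.take_succ_eq_append_getElem hlt
          conv_rhs => rw [goPad]
          rw [if_neg hgap]
          rw [ht]
          simp only [List.append_assoc, List.cons_append, List.nil_append]
      · simp only [dif_neg hlt]
        have hieq : i = xs.length := by omega
        simp [hieq, goPad]

theorem foldl_padStep (l : List (Int × Int)) : ∀ (acc : List (Int × Int)) (last : Int),
    (l.foldl padStep (acc, last)).1 = acc ++ goPad l last := by
  induction l with
  | nil => intro acc last; simp [goPad]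
  | cons item rest ih =>
      intro acc last
      simp only [List.foldl_cons, padStep, goPad]
      by_cases hgap : item.1 - last > 1
      · simp only [if_pos hgap]
        rw [ih]
        simp
      · simp only [if_neg hgap]
        rw [ih]
        simp

-- ===== VERDICT (by name: the statement is the Claim_ definition above) =====
theorem pad_with_zeros_spec : Claim_equal_pad_with_zeros := by
  intro hist_list _ _
  unfold Spec_pad_with_zeros pad_with_zeros pad_with_zeros_alt
  rw [padLoop_eq hist_list.length hist_list 0 _ (by omega) (Nat.zero_le _)]
  rw [foldl_padStep]
  simp
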